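-- pv_equiv track=rewrite | github.com/pizzadancer/python_projects | domain_name_finder.py | remove_http
-- ===== SOURCE A (Python) =====
-- def remove_http(url):
--     slash_count = 0
--     index = 0
--     for char in url:
--         # search through url
--         # when find 2 // in a row, remove everything before last index of /
--         if char == "/":
--             slash_count += 1
--         if slash_count > 1:
--             return url[index + 1:]
--         index += 1
-- ===== SOURCE B (Python) =====
-- def remove_http(url):
--     parts = url.split("/", 2)
--     if len(parts) == 3:
--         return parts[2]
--     return None
-- ===== Notes on version B (the rewrite author's own statement) =====
-- stated objective: idiomatic
-- what changed: Replaces the explicit char-by-char slash-counting loop with a single maxsplit-2 str.split that materializes the pieces, returning the third piece when it exists.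
import Mathlib
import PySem

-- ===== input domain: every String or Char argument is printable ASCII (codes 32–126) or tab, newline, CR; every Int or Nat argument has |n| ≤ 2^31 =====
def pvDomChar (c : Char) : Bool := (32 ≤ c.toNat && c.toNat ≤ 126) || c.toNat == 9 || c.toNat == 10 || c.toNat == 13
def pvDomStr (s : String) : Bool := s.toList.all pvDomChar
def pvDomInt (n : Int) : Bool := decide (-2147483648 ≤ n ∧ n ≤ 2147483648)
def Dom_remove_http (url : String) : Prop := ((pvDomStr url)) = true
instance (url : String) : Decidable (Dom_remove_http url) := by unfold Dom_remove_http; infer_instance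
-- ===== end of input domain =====

-- B replaces A's char-by-char slash-counting scan with a single split("/", 2); idiomatic, same cost.

-- ===== PORT A =====
-- the for-loop over url's characters, carrying slash_count and index
def remove_http_go (url : String) (cs : List Char) (slash index : Int) : Option String :=
  match cs with
  | [] => none
  | c :: rest =>
      let slash' := if c = '/' then slash + 1 else slash
      if slash' > 1 then some (PySem.Str.slice url (some (index + 1)) none)
      else remove_http_go url rest slash' (index + 1)

def remove_http (url : String) : Option String :=
  remove_http_go url url.toList 0 0

-- ===== PORT B =====
def remove_http_alt (url : String) : Option String :=
  match PySem.Str.splitMax? url "/" 2 with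
  | none => none
  | some parts => if parts.length = 3 then parts[2]? else none

-- ===== PRECONDITION & SPEC =====
def Spec_remove_http (url : String) (out : Option String) : Prop := out = remove_http_alt url
instance (url : String) (out : Option String) : Decidable (Spec_remove_http url out) := by unfold Spec_remove_http; infer_instance

-- ===== CLAIM (what is proved, stated in full; the proofs are below) =====
def Claim_equal_remove_http : Prop := ∀ (url : String), Dom_remove_http url → Spec_remove_http url (remove_http url)

-- ===== LEMMAS AND PROOFS =====

-- (before, after) of the first '/' in a list, if any
def findSplit : List Char → Option (List Char × List Char)
  | [] => none
  | c :: r => if c = '/' then some ([], r) else (findSplit r).map (fun p => (c :: p.1, p.2))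

-- suffix after the second '/'
def after2 (cs : List Char) : Option (List Char) :=
  (findSplit cs).bind (fun p => (findSplit p.2).map Prod.snd)

lemma findSplit_parts : ∀ (l a b : List Char), findSplit l = some (a, b) →
    l = a ++ '/' :: b := by
  intro l
  induction l with
  | nil => intro a b h; simp [findSplit] at h
  | cons c r ih =>
    intro a b h
    by_cases hc : c = '/'
    · subst hc
      simp [findSplit] at h
      obtain ⟨ha, hb⟩ := h
      subst ha; subst hb; simp
    · simp [findSplit, hc] at h
      cases hfs : findSplit r with
      | none => rw [hfs] at h; simp at h
      | some p =>
        rw [hfs] at h; simp at h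
        obtain ⟨ha2, hp, hA⟩ := h
        subst hA
        have he := ih p.1 p.2 (by rw [hfs])
        rw [he, hp]
        simp

lemma go_m0 : ∀ (fuel : Nat) (l cur : List Char) (acc : List (List Char)),
    PySem.Chars.splitOnMax.go ['/'] fuel 0 l cur acc = ((cur.reverse ++ l) :: acc).reverse := by
  intro fuel l cur acc
  cases fuel <;> cases l <;> simp [PySem.Chars.splitOnMax.go]

lemma go_succ : ∀ (l : List Char) (fuel m : Nat) (cur : List Char) (acc : List (List Char)),
    l.length < fuel →
    PySem.Chars.splitOnMax.go ['/'] fuel (m + 1) l cur acc =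
      match findSplit l with
      | none => ((cur.reverse ++ l) :: acc).reverse
      | some (a, b) =>
          PySem.Chars.splitOnMax.go ['/'] (fuel - a.length - 1) m b [] ((cur.reverse ++ a) :: acc) := by
  intro l
  induction l with
  | nil =>
    intro fuel m cur acc h
    cases fuel with
    | zero => omega
    | succ f => simp [PySem.Chars.splitOnMax.go, findSplit]
  | cons c r ih =>
    intro fuel m cur acc h
    cases fuel with
    | zero => omega
    | succ f =>
      by_cases hc : c = '/'
      · subst hc
        simp [PySem.Chars.splitOnMax.go, findSplit, List.isPrefixOf]
      · have hpre : List.isPrefixOf ['/'] (c :: r) = false := by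
          simp [List.isPrefixOf]; exact Ne.symm hc
        have hlen : r.length < f := by simpa using h
        rw [show PySem.Chars.splitOnMax.go ['/'] (f + 1) (m + 1) (c :: r) cur acc =
              PySem.Chars.splitOnMax.go ['/'] f (m + 1) r (c :: cur) acc by
            simp [PySem.Chars.splitOnMax.go, hpre]]
        rw [ih f m (c :: cur) acc hlen]
        cases hfs : findSplit r with
        | none => simp [findSplit, hc, hfs]
        | some p =>
          simp only [findSplit, hc, if_false, hfs, Option.map_some]
          have h1 : f - p.1.length - 1 = f + 1 - (c :: p.1).length - 1 := by
            simp
          have h2 : (c :: cur).reverse ++ p.1 = cur.reverse ++ c :: p.1 := by simp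
          rw [h1, h2]

-- B's split characterized through findSplit
lemma splitOnMax_two (cs : List Char) :
    PySem.Chars.splitOnMax cs ['/'] 2 =
      match findSplit cs with
      | none => [cs]
      | some (a, b) =>
          match findSplit b with
          | none => [a, b]
          | some (a2, b2) => [a, a2, b2] := by
  unfold PySem.Chars.splitOnMax
  rw [if_neg (by norm_num)]
  rw [show ((2 : Int)).toNat = 1 + 1 from rfl]
  rw [go_succ cs (cs.length + 1) 1 [] [] (by omega)]
  cases hfs : findSplit cs with
  | none => simp
  | some p =>
    have hpe := findSplit_parts cs p.1 p.2 (by rw [hfs])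
    have hlen : p.2.length < cs.length + 1 - p.1.length - 1 := by
      rw [hpe]; simp; omega
    simp only
    rw [go_succ p.2 _ 0 [] _ hlen]
    cases hfs2 : findSplit p.2 with
    | none => simp
    | some q =>
      simp only
      rw [go_m0]
      simp

lemma remove_http_alt_eq (url : String) :
    remove_http_alt url = (after2 url.toList).map String.ofList := by
  unfold remove_http_alt
  have h : PySem.Str.splitMax? url "/" 2 =
      some (List.map String.ofList (PySem.Chars.splitOnMax url.toList ['/'] 2)) := by
    unfold PySem.Str.splitMax? PySem.Chars.splitMax?
    rfl
  rw [h, splitOnMax_two]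
  unfold after2
  cases hfs : findSplit url.toList with
  | none => simp
  | some p =>
    cases hfs2 : findSplit p.2 with
    | none => simp [hfs2]
    | some q => simp [hfs2]

lemma slice_drop (url : String) (n : Nat) :
    PySem.Str.slice url (some ((n : Int) + 1)) none = String.ofList (url.toList.drop (n + 1)) := by
  unfold PySem.Str.slice
  congr 1
  rw [show ((n : Int) + 1) = (((n + 1 : Nat)) : Int) by push_cast; ring]
  rw [PySem.Chars.slice_eq_listSlice, PySem.List.slice_from_natCast]

-- A's scan after the first slash has been seen
lemma A_go1 : ∀ (l pre : List Char) (url : String), url.toList = pre ++ l →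
    remove_http_go url l 1 (pre.length : Int) =
      (findSplit l).map (fun p => String.ofList p.2) := by
  intro l
  induction l with
  | nil => intro pre url h; simp [remove_http_go, findSplit]
  | cons c r ih =>
    intro pre url h
    by_cases hc : c = '/'
    · subst hc
      have hd : url.toList.drop (pre.length + 1) = r := by simp [h]
      simp [remove_http_go, findSplit, slice_drop, hd]
    · have h' : url.toList = (pre ++ [c]) ++ r := by simp [h]
      have hih := ih (pre ++ [c]) url h'
      simp only [List.length_append, List.length_cons, List.length_nil] at hih
      push_cast at hih
      simp only [remove_http_go, hc, if_false]
      rw [if_neg (by norm_num)]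
      rw [hih]
      simp [findSplit, hc]
      cases hfs : findSplit r <;> simp

-- A's scan before any slash has been seen
lemma A_go0 : ∀ (l pre : List Char) (url : String), url.toList = pre ++ l →
    remove_http_go url l 0 (pre.length : Int) =
      (after2 l).map String.ofList := by
  intro l
  induction l with
  | nil => intro pre url h; simp [remove_http_go, after2, findSplit]
  | cons c r ih =>
    intro pre url h
    by_cases hc : c = '/'
    · subst hc
      have h' : url.toList = (pre ++ ['/']) ++ r := by simp [h]
      have hih := A_go1 r (pre ++ ['/']) url h'
      simp only [List.length_append, List.length_cons, List.length_nil] at hih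
      push_cast at hih
      simp only [remove_http_go]
      norm_num
      rw [hih]
      simp [after2, findSplit]
      cases hfs : findSplit r <;> simp
    · have h' : url.toList = (pre ++ [c]) ++ r := by simp [h]
      have hih := ih (pre ++ [c]) url h'
      simp only [List.length_append, List.length_cons, List.length_nil] at hih
      push_cast at hih
      simp only [remove_http_go, hc, if_false]
      rw [if_neg (by norm_num)]
      rw [hih]
      simp only [after2, findSplit, hc, if_false]
      cases hfs : findSplit r <;> simp

-- ===== VERDICT (by name: the statement is the Claim_ definition above) =====
theorem remove_http_spec : Claim_equal_remove_http := by
  intro url _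
  unfold Spec_remove_http remove_http
  rw [remove_http_alt_eq]
  have h := A_go0 url.toList [] url (by simp)
  simpa using h
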